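-- pv_equiv track=rewrite | github.com/Jafarkor/Martin_Eden_book_tg_bot | services/file_handling.py | _my_rfind
-- ===== SOURCE A (Python) =====
-- def _my_rfind(text, start, fin):
--     syms = '.!?;'
--     stop = start
--     for sym in syms:
--         now = text.rfind(sym, start, fin)
--         if now > stop:
--             stop = now
--     return stop
-- ===== SOURCE B (Python) =====
-- def _my_rfind(text, start, fin):
--     chunk = text[start:fin]
--     base = len(text[:start])
--     for i in reversed(range(len(chunk))):
--         if chunk[i] in '.!?;':
--             return base + i
--     return start
-- ===== Notes on version B (the rewrite author's own statement) =====
-- stated objective: simpler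
-- what changed: Replaces the four separate rfind passes (one per punctuation symbol) with one backward scan of the slice text[start:fin] that returns the last sentence-ending position, falling back to start when none is found.
-- intended difference: On inputs with start < -1 whose range text[start:fin] contains no sentence-ending character, A leaks rfind's -1 sentinel (because -1 > start) and returns -1, while B returns the fallback start, the intended 'no boundary found' answer. — e.g. on _my_rfind("ab", -2, 2): A returns -1, B returns -2
import Mathlib
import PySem

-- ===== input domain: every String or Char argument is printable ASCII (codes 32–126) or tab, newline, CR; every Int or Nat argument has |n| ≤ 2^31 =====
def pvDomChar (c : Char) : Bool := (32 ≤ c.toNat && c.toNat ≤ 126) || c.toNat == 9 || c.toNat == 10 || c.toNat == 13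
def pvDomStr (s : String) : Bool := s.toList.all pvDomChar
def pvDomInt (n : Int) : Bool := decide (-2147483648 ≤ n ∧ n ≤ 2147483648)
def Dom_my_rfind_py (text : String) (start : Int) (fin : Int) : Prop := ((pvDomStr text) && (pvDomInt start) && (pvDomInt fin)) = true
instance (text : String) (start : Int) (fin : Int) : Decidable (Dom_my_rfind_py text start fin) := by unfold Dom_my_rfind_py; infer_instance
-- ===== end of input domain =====

-- B replaces A's four per-symbol rfind passes by one backward scan of the slice
-- text[start:fin], returning the last sentence-ending position, else start (objective: simpler).

-- ===== PORT A =====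
-- for sym in '.!?;': now = text.rfind(sym, start, fin); if now > stop: stop = now
def my_rfind_py (text : String) (start : Int) (fin : Int) : Int :=
  let syms : String := ".!?;"
  syms.toList.foldl
    (fun stop sym =>
      let now := PySem.Str.rfindFrom text (String.ofList [sym]) start (some fin)
      if now > stop then now else stop)
    start

-- ===== PORT B =====
-- chunk[i] in '.!?;'  (membership of a single character)
def pvSent (c : Char) : Bool := (c == '.') || (c == '!') || (c == '?') || (c == ';')

-- the 'for i in reversed(range(len(chunk))): if chunk[i] in '.!?;': return i' loop of Source B
def pvFindRev (chunk : List Char) : List Nat → Option Nat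
  | [] => none
  | i :: rest => if pvSent (PySem.List.pyGetD chunk (i : Int) ' ') then some i else pvFindRev chunk rest

def my_rfind_py_alt (text : String) (start : Int) (fin : Int) : Int :=
  let cs := text.toList
  let chunk := PySem.List.slice cs (some start) (some fin)   -- text[start:fin]
  let base : Int := (PySem.List.slice cs none (some start)).length   -- len(text[:start])
  match pvFindRev chunk (List.range chunk.length).reverse with
  | some i => base + (i : Int)
  | none => start

-- ===== PRECONDITION & SPEC =====
-- On inputs with start < -1 whose range text[start:fin] contains no sentence-ending
-- character, A leaks rfind's -1 sentinel (since -1 > start) and returns -1, while B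
-- returns the fallback start, the intended 'no boundary found' answer.
def D_my_rfind_py (text : String) (start : Int) (fin : Int) : Prop :=
  start < -1 ∧ ∀ j : Nat, j < text.toList.length → (text.toList.length : Int) + start ≤ (j : Int) →
    (j : Int) < (if fin < 0 then fin + (text.toList.length : Int) else fin) →
    text.toList.getD j ' ' ∉ (['.', '!', '?', ';'] : List Char)
instance (text : String) (start : Int) (fin : Int) : Decidable (D_my_rfind_py text start fin) := by
  unfold D_my_rfind_py; infer_instance

def Spec_my_rfind_py (text : String) (start : Int) (fin : Int) (out : Int) : Prop :=
  ¬ D_my_rfind_py text start fin → out = my_rfind_py_alt text start fin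
instance (text : String) (start : Int) (fin : Int) (out : Int) : Decidable (Spec_my_rfind_py text start fin out) := by
  unfold Spec_my_rfind_py; infer_instance

def pvDiffWitness_my_rfind_py : String × Int × Int := ("ab", -2, 2)
def pvDiffWitnessOut_my_rfind_py : Int × Int := (-1, -2)

-- ===== CLAIM (what is proved, stated in full; the proofs are below) =====
def Claim_unchanged_my_rfind_py : Prop := ∀ (text : String) (start : Int) (fin : Int), Dom_my_rfind_py text start fin → Spec_my_rfind_py text start fin (my_rfind_py text start fin)
def Claim_changed_my_rfind_py : Prop := Dom_my_rfind_py (pvDiffWitness_my_rfind_py.1) (pvDiffWitness_my_rfind_py.2.1) (pvDiffWitness_my_rfind_py.2.2) ∧ D_my_rfind_py (pvDiffWitness_my_rfind_py.1) (pvDiffWitness_my_rfind_py.2.1) (pvDiffWitness_my_rfind_py.2.2) ∧ my_rfind_py (pvDiffWitness_my_rfind_py.1) (pvDiffWitness_my_rfind_py.2.1) (pvDiffWitness_my_rfind_py.2.2) = pvDiffWitnessOut_my_rfind_py.1 ∧ my_rfind_py_alt (pvDiffWitness_my_rfind_py.1) (pvDiffWitness_my_rfind_py.2.1) (pvDiffWitness_my_rfind_py.2.2)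 = pvDiffWitnessOut_my_rfind_py.2 ∧ pvDiffWitnessOut_my_rfind_py.1 ≠ pvDiffWitnessOut_my_rfind_py.2
def Claim_exact_my_rfind_py : Prop := ∀ (text : String) (start : Int) (fin : Int), Dom_my_rfind_py text start fin → D_my_rfind_py text start fin → my_rfind_py text start fin ≠ my_rfind_py_alt text start fin

-- ===== LEMMAS AND PROOFS =====

-- the normalized slice bounds exactly as rfind computes them
def pvS (n start : Int) : Int := if start < 0 then (if start + n < 0 then 0 else start + n) else start
def pvE (n fin : Int) : Int := if n < fin then n else if fin < 0 then (if fin + n < 0 then 0 else fin + n) else fin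

-- greatest j < m with p j, as an Option
def pvLastSat (p : Nat → Bool) : Nat → Option Nat
  | 0 => none
  | m+1 => if p m then some m else pvLastSat p m

def pvVal (o : Option Nat) : Int := o.elim (-1) (fun j => (j : Int))

theorem pvLastSat_none (p : Nat → Bool) : ∀ m, (∀ j, j < m → p j = false) → pvLastSat p m = none := by
  intro m
  induction m with
  | zero => intro _; rfl
  | succ m ih =>
    intro h
    simp only [pvLastSat, h m (by omega)]
    exact ih (fun j hj => h j (by omega))

theorem pvLastSat_eq_none (p : Nat → Bool) : ∀ m, pvLastSat p m = none → ∀ j, j < m → p j = false := by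
  intro m
  induction m with
  | zero => intro _ j hj; omega
  | succ m ih =>
    intro h j hj
    by_cases hm : p m = true
    · simp [pvLastSat, hm] at h
    · rcases Nat.lt_succ_iff_lt_or_eq.mp hj with h' | h'
      · exact ih (by simpa [pvLastSat, hm] using h) j h'
      · subst h'; simpa using hm
    
theorem pvVal_lt (p : Nat → Bool) : ∀ m, pvVal (pvLastSat p m) < (m : Int) := by
  intro m
  induction m with
  | zero => simp [pvLastSat, pvVal]
  | succ m ih =>
    simp only [pvLastSat]
    split
    · simp only [pvVal, Option.elim]; push_cast; omega
    · push_cast; omega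

theorem pvLastSat_congr (p q : Nat → Bool) : ∀ m, (∀ j, j < m → p j = q j) → pvLastSat p m = pvLastSat q m := by
  intro m
  induction m with
  | zero => intro _; rfl
  | succ m ih =>
    intro h
    simp only [pvLastSat, h m (by omega)]
    rw [ih (fun j hj => h j (by omega))]

theorem pvVal_or (p q : Nat → Bool) : ∀ m,
    pvVal (pvLastSat (fun j => p j || q j) m) = max (pvVal (pvLastSat p m)) (pvVal (pvLastSat q m)) := by
  intro m
  induction m with
  | zero => simp [pvLastSat, pvVal]
  | succ m ih =>
    have hp := pvVal_lt p m
    have hq := pvVal_lt q m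
    simp only [pvLastSat]
    by_cases h1 : p m = true <;> by_cases h2 : q m = true <;>
        simp only [h1, h2, Bool.or_true, Bool.or_false,
          Bool.false_eq_true, if_true, if_false]
    · simp [pvVal]
    · rcases hE : pvLastSat q m with _ | j <;> rw [hE] at hq <;> simp [pvVal] at hq ⊢
      omega
    · rcases hE : pvLastSat p m with _ | j <;> rw [hE] at hp <;> simp [pvVal] at hp ⊢
      omega
    · exact ih

-- [c].isPrefixOf l tests whether the first character of l is c (for c ≠ ' ' via getD)
theorem pvPrefix_single (c : Char) (hc : c ≠ ' ') (l : List Char) :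
    [c].isPrefixOf l = (l.getD 0 ' ' == c) := by
  cases l with
  | nil => simp [List.isPrefixOf, List.getD]; exact fun h => hc h.symm
  | cons x xs => simp [List.isPrefixOf, List.getD, BEq.comm]

theorem pvGo_eq (region : List Char) (c : Char) (hc : c ≠ ' ') : ∀ J,
    PySem.Chars.rfind.go region [c] J = pvVal (pvLastSat (fun j => region.getD j ' ' == c) (J + 1)) := by
  intro J
  induction J with
  | zero =>
    show (if [c].isPrefixOf region then (0:Int) else -1) = _
    rw [pvPrefix_single c hc]
    simp only [pvLastSat]
    split <;> simp_all [pvVal]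
  | succ J ih =>
    show (if [c].isPrefixOf (region.drop (J+1)) then ((J:Int)+1) else PySem.Chars.rfind.go region [c] J) = _
    rw [pvPrefix_single c hc, ih]
    have hd : (region.drop (J+1)).getD 0 ' ' = region.getD (J+1) ' ' := by
      simp [List.getD_eq_getElem?_getD, List.getElem?_drop]
    rw [hd]
    conv_rhs => rw [pvLastSat]
    split <;> simp [pvVal]

theorem pvLastSat_shift (p : Nat → Bool) (S : Nat) : ∀ m,
    pvLastSat (fun j => decide (S ≤ j) && p j) (S + m) = (pvLastSat (fun j => p (S + j)) m).map (· + S) := by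
  intro m
  induction m with
  | zero =>
    simp only [Nat.add_zero, pvLastSat, Option.map_none]
    exact pvLastSat_none _ S (fun j hj => by simp [Nat.not_le.mpr hj])
  | succ m ih =>
    have : S + (m + 1) = (S + m) + 1 := by omega
    rw [this]
    simp only [pvLastSat, Nat.le_add_right, decide_true, Bool.true_and]
    split
    · simp [Nat.add_comm]
    · exact ih

-- rfindFrom of a single non-blank character, characterized on absolute indices
theorem pvRfindFrom_pv (cs sub : List Char) (start fin : Int) :
    PySem.Chars.rfindFrom cs sub start (some fin) =
      (if pvE (cs.length) fin < pvS (cs.length) start then -1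
       else
         (let r := PySem.Chars.rfind
             (List.drop (pvS (cs.length) start).toNat (List.take (pvE (cs.length) fin).toNat cs)) sub
          if r = -1 then -1 else pvS (cs.length) start + r)) := rfl

theorem pvRff (cs : List Char) (c : Char) (hc : c ≠ ' ') (start fin : Int) :
    PySem.Chars.rfindFrom cs [c] start (some fin) =
      pvVal (pvLastSat (fun j => decide (pvS (cs.length) start ≤ (j:Int)) && (cs.getD j ' ' == c))
        (pvE (cs.length) fin).toNat) := by
  have hn0 : (0:Int) ≤ (cs.length : Int) := by positivity
  have hS0 : (0:Int) ≤ pvS (cs.length) start := by unfold pvS; split_ifs <;> omega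
  have hE0 : (0:Int) ≤ pvE (cs.length) fin := by unfold pvE; split_ifs <;> omega
  have hEn : pvE (cs.length) fin ≤ (cs.length : Int) := by unfold pvE; split_ifs <;> omega
  rw [pvRfindFrom_pv]
  set S := pvS (cs.length) start with hSdef
  set E := pvE (cs.length) fin with hEdef
  by_cases hlt : E < S
  · rw [if_pos hlt]
    rw [pvLastSat_none _ _ (fun j hj => ?_)]
    · rfl
    · have hj' : ¬ S ≤ (j:Int) := by omega
      simp [hj']
  · rw [if_neg hlt]
    set Sn := S.toNat with hSn
    set En := E.toNat with hEn2
    set region := List.drop Sn (List.take En cs) with hreg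
    have hSnEn : Sn ≤ En := by omega
    have hEnlen : En ≤ cs.length := by omega
    have hlen : region.length = En - Sn := by
      rw [hreg, List.length_drop, List.length_take]
      omega
    -- collapse the extra top index of rfind.go (it is out of range)
    have hp : ((region.getD region.length ' ' == c) : Bool) = false := by
      have h1 : region.getD region.length ' ' = ' ' := by
        rw [List.getD_eq_getElem?_getD]
        rw [List.getElem?_eq_none (by omega)]
        rfl
      rw [h1]
      exact beq_eq_false_iff_ne.mpr (Ne.symm hc)
    have hrf : PySem.Chars.rfind region [c] =
        pvVal (pvLastSat (fun j => region.getD j ' ' == c) region.length) := by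
      rw [PySem.Chars.rfind, pvGo_eq region c hc]
      congr 1
      conv_lhs => rw [pvLastSat]
      have hcond : ¬ ((fun j => region.getD j ' ' == c) region.length = true) := by
        show ¬ ((region.getD region.length ' ' == c) = true)
        rw [hp]; simp
      rw [if_neg hcond]
    -- region indices are cs indices shifted by Sn
    have hgd : ∀ j, j < En - Sn →
        ((region.getD j ' ' == c) : Bool) = ((cs.getD (Sn + j) ' ' == c) : Bool) := by
      intro j hj
      have h1 : region.getD j ' ' = cs.getD (Sn + j) ' ' := by
        rw [hreg]
        rw [List.getD_eq_getElem?_getD, List.getD_eq_getElem?_getD]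
        rw [List.getElem?_drop]
        rw [List.getElem?_take_of_lt (by omega)]
      rw [h1]
    have hdec : ∀ j : Nat, decide (S ≤ (j:Int)) = decide (Sn ≤ j) :=
      fun j => decide_eq_decide.mpr (by omega)
    calc (let r := PySem.Chars.rfind region [c]; if r = -1 then -1 else S + r)
        = pvVal ((pvLastSat (fun j => cs.getD (Sn + j) ' ' == c) (En - Sn)).map (· + Sn)) := by
          show (if PySem.Chars.rfind region [c] = -1 then -1
                else S + PySem.Chars.rfind region [c]) = _
          rw [hrf, hlen, pvLastSat_congr _ _ (En - Sn) hgd]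
          rcases hE : pvLastSat (fun j => cs.getD (Sn + j) ' ' == c) (En - Sn) with _ | j
          · simp [pvVal]
          · have : ((j:Int)) ≠ -1 := by omega
            simp only [pvVal, Option.map_some, Option.elim, this]
            push_cast
            omega
      _ = pvVal (pvLastSat (fun j => decide (S ≤ (j:Int)) && (cs.getD j ' ' == c)) En) := by
          rw [pvLastSat_congr (fun j => decide (S ≤ (j:Int)) && (cs.getD j ' ' == c))
            (fun j => decide (Sn ≤ j) && (cs.getD j ' ' == c)) En (fun j _ => by simp only [hdec j])]
          have hsh := pvLastSat_shift (fun j => cs.getD j ' ' == c) Sn (En - Sn)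
          rw [show Sn + (En - Sn) = En from by omega] at hsh
          rw [hsh]

-- split the four-way membership test into four single-character tests
theorem pvSplit4 (S : Int) (cs : List Char) (m : Nat) :
    pvVal (pvLastSat (fun j => decide (S ≤ (j:Int)) && pvSent (cs.getD j ' ')) m) =
      max (max (max
        (pvVal (pvLastSat (fun j => decide (S ≤ (j:Int)) && (cs.getD j ' ' == '.')) m))
        (pvVal (pvLastSat (fun j => decide (S ≤ (j:Int)) && (cs.getD j ' ' == '!')) m)))
        (pvVal (pvLastSat (fun j => decide (S ≤ (j:Int)) && (cs.getD j ' ' == '?')) m)))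
        (pvVal (pvLastSat (fun j => decide (S ≤ (j:Int)) && (cs.getD j ' ' == ';')) m)) := by
  have h : ∀ j : Nat, (decide (S ≤ (j:Int)) && pvSent (cs.getD j ' ')) =
      ((((decide (S ≤ (j:Int)) && (cs.getD j ' ' == '.')) ||
         (decide (S ≤ (j:Int)) && (cs.getD j ' ' == '!'))) ||
         (decide (S ≤ (j:Int)) && (cs.getD j ' ' == '?'))) ||
         (decide (S ≤ (j:Int)) && (cs.getD j ' ' == ';'))) := by
    intro j
    unfold pvSent
    cases decide (S ≤ (j:Int)) <;> simp
  rw [pvLastSat_congr _ _ m (fun j _ => h j), pvVal_or, pvVal_or, pvVal_or]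

theorem pvIte_max (a b : Int) : (if b > a then b else a) = max a b := by
  rcases le_or_gt b a with h | h <;> simp [max_def] <;> omega

-- A = max start (position of the last sentence char in the normalized range, else -1)
theorem pvA_eq (text : String) (start fin : Int) :
    my_rfind_py text start fin =
      max start (pvVal (pvLastSat
        (fun j => decide (pvS (text.toList.length) start ≤ (j:Int)) && pvSent (text.toList.getD j ' '))
        (pvE (text.toList.length) fin).toNat)) := by
  simp only [my_rfind_py]
  rw [show ((".!?;" : String).toList) = ['.', '!', '?', ';'] from rfl]
  simp only [List.foldl, PySem.Str.rfindFrom_eq]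
  have h1 : ((String.ofList ['.']).toList) = ['.'] := rfl
  have h2 : ((String.ofList ['!']).toList) = ['!'] := rfl
  have h3 : ((String.ofList ['?']).toList) = ['?'] := rfl
  have h4 : ((String.ofList [';']).toList) = [';'] := rfl
  rw [h1, h2, h3, h4]
  rw [pvRff _ _ (by decide), pvRff _ _ (by decide), pvRff _ _ (by decide), pvRff _ _ (by decide)]
  rw [pvSplit4]
  simp only [pvIte_max]
  simp [max_assoc]

-- pvFindRev over reversed(range(m)) is exactly pvLastSat on the chunk
theorem pvFindRev_eq (chunk : List Char) : ∀ m,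
    pvFindRev chunk (List.range m).reverse = pvLastSat (fun j => pvSent (chunk.getD j ' ')) m := by
  intro m
  induction m with
  | zero => rfl
  | succ m ih =>
    rw [List.range_succ, List.reverse_append]
    simp only [List.reverse_cons, List.reverse_nil, List.nil_append, List.singleton_append]
    simp only [pvFindRev, pvLastSat, PySem.List.pyGetD_natCast]
    split <;> [rfl; exact ih]

-- the slice bounds agree with pvS/pvE
theorem pvClampE (n : Nat) (fin : Int) : PySem.List.clampIdx n fin = (pvE n fin).toNat := by
  unfold PySem.List.clampIdx pvE
  split_ifs <;> omega

theorem pvClampS (n : Nat) (start : Int) : PySem.List.clampIdx n start = min (pvS n start).toNat n := by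
  unfold PySem.List.clampIdx pvS
  split_ifs <;> omega

theorem pvS_nonneg (n : Nat) (start : Int) : 0 ≤ pvS n start := by
  unfold pvS; split_ifs <;> omega

theorem pvS_ge_start (n : Nat) (start : Int) : start ≤ pvS n start := by
  unfold pvS; split_ifs <;> omega

theorem pvE_le (n : Nat) (fin : Int) : pvE n fin ≤ n := by
  unfold pvE; split_ifs <;> omega

-- the chunk text[start:fin] as drop/take with the pvS/pvE bounds
theorem pvChunk_eq (cs : List Char) (start fin : Int) :
    PySem.List.slice cs (some start) (some fin) =
      (cs.drop (pvS cs.length start).toNat).take ((pvE cs.length fin).toNat - (pvS cs.length start).toNat) := by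
  show (cs.drop (PySem.List.clampIdx cs.length start)).take
      (PySem.List.clampIdx cs.length fin - PySem.List.clampIdx cs.length start) = _
  rw [pvClampE, pvClampS]
  rcases le_or_gt (pvS cs.length start).toNat cs.length with h | h
  · rw [min_eq_left h]
  · rw [min_eq_right (by omega)]
    have hE := pvE_le cs.length fin
    rw [List.drop_eq_nil_of_le (le_refl _), List.drop_eq_nil_of_le (by omega)]
    simp

-- the combined scan over absolute indices equals the chunk scan shifted by pvS
theorem pvB_char (cs : List Char) (start fin : Int) :
    pvLastSat (fun j => decide (pvS cs.length start ≤ (j:Int)) && pvSent (cs.getD j ' '))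
        (pvE cs.length fin).toNat =
      (pvLastSat (fun j => pvSent ((PySem.List.slice cs (some start) (some fin)).getD j ' '))
        (PySem.List.slice cs (some start) (some fin)).length).map (· + (pvS cs.length start).toNat) := by
  have hS0 := pvS_nonneg cs.length start
  have hEl := pvE_le cs.length fin
  set S := pvS cs.length start with hSdef
  set Sn := S.toNat with hSndef
  set En := (pvE cs.length fin).toNat with hEndef
  have hEnn : En ≤ cs.length := by omega
  have hchunk := pvChunk_eq cs start fin
  have hlen : (PySem.List.slice cs (some start) (some fin)).length = En - Sn := by
    rw [hchunk, List.length_take, List.length_drop]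
    omega
  have hdec : ∀ j : Nat, decide (S ≤ (j:Int)) = decide (Sn ≤ j) :=
    fun j => decide_eq_decide.mpr (by omega)
  rcases le_or_gt Sn En with h | h
  · have hgd : ∀ j, j < En - Sn →
        pvSent ((PySem.List.slice cs (some start) (some fin)).getD j ' ') = pvSent (cs.getD (Sn + j) ' ') := by
      intro j hj
      have h1 : (PySem.List.slice cs (some start) (some fin)).getD j ' ' = cs.getD (Sn + j) ' ' := by
        rw [hchunk, List.getD_eq_getElem?_getD, List.getD_eq_getElem?_getD,
          List.getElem?_take_of_lt hj, List.getElem?_drop]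
      rw [h1]
    rw [pvLastSat_congr _ (fun j => decide (Sn ≤ j) && pvSent (cs.getD j ' ')) En
      (fun j _ => by simp only [hdec j])]
    have hsh := pvLastSat_shift (fun j => pvSent (cs.getD j ' ')) Sn (En - Sn)
    rw [show Sn + (En - Sn) = En from by omega] at hsh
    rw [hsh, hlen]
    rw [pvLastSat_congr _ _ (En - Sn) hgd]
  · rw [pvLastSat_none _ En (fun j hj => by
      have : ¬ S ≤ (j:Int) := by omega
      simp [this])]
    rw [hlen, show En - Sn = 0 from by omega]
    rfl

-- 'no sentence char in the index range' ↔ the chunk scan finds nothing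
theorem pvD_iff_none (cs : List Char) (start fin : Int) (hstart : start < 0) :
    (∀ j : Nat, j < cs.length → (cs.length : Int) + start ≤ (j : Int) →
        (j : Int) < (if fin < 0 then fin + (cs.length : Int) else fin) →
        cs.getD j ' ' ∉ (['.', '!', '?', ';'] : List Char)) ↔
      pvLastSat (fun j => pvSent ((PySem.List.slice cs (some start) (some fin)).getD j ' '))
        (PySem.List.slice cs (some start) (some fin)).length = none := by
  set Sn := (pvS cs.length start).toNat with hSndef
  set En := (pvE cs.length fin).toNat with hEndef
  have hEl := pvE_le cs.length fin
  have hidx : ∀ j : Nat, ((j < cs.length) ∧ ((cs.length : Int) + start ≤ (j : Int)) ∧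
      ((j : Int) < (if fin < 0 then fin + (cs.length : Int) else fin))) ↔ (Sn ≤ j ∧ j < En) := by
    intro j
    rw [hSndef, hEndef]
    unfold pvS pvE
    split_ifs <;> constructor <;> (intro h; push_cast at *; omega)
  have hchunk := pvChunk_eq cs start fin
  have hlen : (PySem.List.slice cs (some start) (some fin)).length = En - Sn := by
    rw [hchunk, List.length_take, List.length_drop]
    omega
  have hgd : ∀ i, i < En - Sn →
      (PySem.List.slice cs (some start) (some fin)).getD i ' ' = cs.getD (Sn + i) ' ' := by
    intro i hi
    rw [hchunk, List.getD_eq_getElem?_getD, List.getD_eq_getElem?_getD,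
      List.getElem?_take_of_lt hi, List.getElem?_drop]
  constructor
  · intro h
    apply pvLastSat_none
    intro i hi
    rw [hlen] at hi
    rw [hgd i hi]
    have hj := (hidx (Sn + i)).mpr ⟨by omega, by omega⟩
    have := h (Sn + i) hj.1 hj.2.1 hj.2.2
    simp only [pvSent]
    simp at this ⊢
    tauto
  · intro h j hj1 hj2 hj3
    have hj := (hidx j).mp ⟨hj1, hj2, hj3⟩
    have hi : j - Sn < En - Sn := by omega
    have := pvLastSat_eq_none _ _ (by rw [← hlen]; exact h) (j - Sn) hi
    rw [hgd (j - Sn) hi, show Sn + (j - Sn) = j from by omega] at this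
    simp [pvSent] at this ⊢
    tauto

-- ===== VERDICT helpers: the relation between A and B on a given input =====
theorem pvMain (text : String) (start fin : Int) :
    (∀ i, pvFindRev (PySem.List.slice text.toList (some start) (some fin))
        (List.range (PySem.List.slice text.toList (some start) (some fin)).length).reverse = some i →
      my_rfind_py text start fin = my_rfind_py_alt text start fin) ∧
    (pvFindRev (PySem.List.slice text.toList (some start) (some fin))
        (List.range (PySem.List.slice text.toList (some start) (some fin)).length).reverse = none →
      my_rfind_py text start fin = max start (-1) ∧ my_rfind_py_alt text start fin = start) := by
  set cs := text.toList with hcs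
  have hA := pvA_eq text start fin
  have hB := pvB_char cs start fin
  constructor
  · intro i hsome
    rw [pvFindRev_eq] at hsome
    rw [hsome] at hB
    have hlt := pvVal_lt (fun j => decide (pvS cs.length start ≤ (j:Int)) && pvSent (cs.getD j ' '))
      (pvE cs.length fin).toNat
    rw [hB] at hlt hA
    simp only [pvVal, Option.map_some, Option.elim] at hlt hA
    have hEl := pvE_le cs.length fin
    have hS0 := pvS_nonneg cs.length start
    have hSg := pvS_ge_start cs.length start
    -- base = clampIdx = pvS.toNat here, since the found index forces pvS.toNat < cs.length
    have hbase : ((PySem.List.slice cs none (some start)).length : Int) = ((pvS cs.length start).toNat : Int) := by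
      show (((cs.take (PySem.List.clampIdx cs.length start)).length : Nat) : Int) = _
      rw [List.length_take, pvClampS]
      have : (pvS cs.length start).toNat ≤ cs.length := by omega
      rw [min_eq_left (min_le_right _ _), min_eq_left this]
    simp only [my_rfind_py_alt]
    rw [← hcs, pvFindRev_eq, hsome, hA, hbase]
    push_cast
    omega
  · intro hnone
    rw [pvFindRev_eq] at hnone
    rw [hnone] at hB
    simp only [Option.map_none] at hB
    rw [hB] at hA
    simp only [pvVal, Option.elim] at hA
    refine ⟨hA, ?_⟩
    simp only [my_rfind_py_alt]
    rw [← hcs, pvFindRev_eq, hnone]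

-- ===== VERDICT (by name: the statements are the Claim_ definitions above) =====
theorem my_rfind_py_spec : Claim_unchanged_my_rfind_py := by
  intro text start fin _ hD
  obtain ⟨hsome, hnone⟩ := pvMain text start fin
  rcases h : pvFindRev (PySem.List.slice text.toList (some start) (some fin))
      (List.range (PySem.List.slice text.toList (some start) (some fin)).length).reverse with _ | i
  · obtain ⟨hA, hB⟩ := hnone h
    rw [hA, hB]
    rw [pvFindRev_eq] at h
    have hstart : ¬ start < -1 := fun hlt =>
      hD ⟨hlt, (pvD_iff_none text.toList start fin (by omega)).mpr h⟩
    rw [max_eq_left (by omega)]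
  · exact hsome i h

theorem my_rfind_py_changed : Claim_changed_my_rfind_py := by
  unfold Claim_changed_my_rfind_py; decide

theorem my_rfind_py_tight : Claim_exact_my_rfind_py := by
  intro text start fin _ hD
  obtain ⟨hlt, hall⟩ := hD
  obtain ⟨_, hnone⟩ := pvMain text start fin
  have h : pvFindRev (PySem.List.slice text.toList (some start) (some fin))
      (List.range (PySem.List.slice text.toList (some start) (some fin)).length).reverse = none := by
    rw [pvFindRev_eq]
    exact (pvD_iff_none text.toList start fin (by omega)).mp hall
  obtain ⟨hA, hB⟩ := hnone h
  rw [hA, hB, max_eq_right (by omega)]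
  omega
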